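-- pv_equiv track=rewrite | github.com/GanschowJosh/PersonalProjects | Kattis/Almost Perfect.py | perfectCheck
-- ===== SOURCE A (Python) =====
-- def perfectCheck(n):
--     divisors = []
--     for i in range(1, n):
--         if n%i == 0:
--             divisors.append(i)
--     if sum(divisors) == n:
--         return "perfect"
--     elif abs(sum(divisors)-n) <= 2:
--         return "almost perfect"
--     else:
--         return "not perfect"
-- ===== SOURCE B (Python) =====
-- def perfectCheck(n):
--     s = 0
--     i = 1
--     while i * i <= n:
--         if n % i == 0:
--             if i != n:
--                 s += i
--             j = n // i
--             if j != i and j != n: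
--                 s += j
--         i += 1
--     if s == n:
--         return "perfect"
--     if abs(s - n) <= 2:
--         return "almost perfect"
--     return "not perfect"
-- ===== Notes on version B (the rewrite author's own statement) =====
-- stated objective: faster
-- what changed: B sums proper divisors by iterating i only up to sqrt(n), adding each divisor i together with its cofactor n//i (skipping n itself and the square root double-count), instead of A's scan over all of range(1,n).
import Mathlib
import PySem

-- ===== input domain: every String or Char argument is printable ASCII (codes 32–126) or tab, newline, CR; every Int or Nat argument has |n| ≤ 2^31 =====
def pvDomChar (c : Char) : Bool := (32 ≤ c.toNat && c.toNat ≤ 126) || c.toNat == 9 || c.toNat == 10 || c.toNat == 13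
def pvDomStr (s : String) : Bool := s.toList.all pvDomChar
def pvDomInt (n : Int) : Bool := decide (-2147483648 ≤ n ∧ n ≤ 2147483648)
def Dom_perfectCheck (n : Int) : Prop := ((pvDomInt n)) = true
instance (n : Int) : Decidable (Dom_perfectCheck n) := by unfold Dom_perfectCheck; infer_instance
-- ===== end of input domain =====

-- B replaces A's O(n) scan of range(1,n) with an O(sqrt n) loop adding each divisor and its cofactor.

-- ===== PORT A =====
def perfectCheck (n : Int) : String :=
  let divisors := (PySem.List.pyRange 1 n 1).foldl
      (fun acc i => if PySem.Int.mod n i = 0 then acc ++ [i] else acc) []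
  if divisors.sum = n then "perfect"
  else if |divisors.sum - n| ≤ 2 then "almost perfect"
  else "not perfect"

-- ===== PORT B =====
-- the while loop of Source B: i counts up while i*i ≤ n, s accumulates divisors
def pvLoopB (n i s : Int) : Int :=
  if h : i * i ≤ n then
    let s' :=
      if PySem.Int.mod n i = 0 then
        let s1 := if i ≠ n then s + i else s
        let j := PySem.Int.floordiv n i
        if j ≠ i ∧ j ≠ n then s1 + j else s1
      else s
    pvLoopB n (i + 1) s'
  else s
termination_by (n + 1 - i).toNat
decreasing_by
  have hii : i ≤ i * i := by nlinarith [mul_self_nonneg (i - 1)]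
  have : i ≤ n := le_trans hii h
  omega

def perfectCheck_alt (n : Int) : String :=
  let s := pvLoopB n 1 0
  if s = n then "perfect"
  else if |s - n| ≤ 2 then "almost perfect"
  else "not perfect"

-- ===== PRECONDITION & SPEC =====
def Spec_perfectCheck (n : Int) (out : String) : Prop := out = perfectCheck_alt n
instance (n : Int) (out : String) : Decidable (Spec_perfectCheck n out) := by unfold Spec_perfectCheck; infer_instance

-- ===== CLAIM (what is proved, stated in full; the proofs are below) =====
def Claim_equal_perfectCheck : Prop := ∀ (n : Int), Dom_perfectCheck n → Spec_perfectCheck n (perfectCheck n)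

-- ===== LEMMAS AND PROOFS =====

-- indicator summed by A over Ico 1 m: proper divisors of m
def pvGA (m d : ℕ) : Int := if d ∣ m then (d : Int) else 0
-- indicator summed by B over Ico 1 (sqrt m + 1): divisor plus cofactor, skipping m and the double-counted root
def pvGB (m d : ℕ) : Int :=
  if d ∣ m then
    (if d ≠ m then (d : Int) else 0) + (if m / d ≠ d ∧ m / d ≠ m then ((m / d : ℕ) : Int) else 0)
  else 0

lemma pv_list_sum_range (f : ℕ → Int) (N : ℕ) :
    ((List.range N).map f).sum = ∑ k ∈ Finset.range N, f k := by
  induction N with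
  | zero => simp
  | succ n ih => rw [List.range_succ]; simp [Finset.sum_range_succ, ih]

lemma pv_filter_sum (p : Int → Bool) (l : List Int) :
    (l.filter p).sum = (l.map (fun i => if p i then i else 0)).sum := by
  induction l with
  | nil => simp
  | cons a t ih => by_cases h : p a <;> simp [h, ih]

lemma pv_sumA (n : Int) (hn : 0 ≤ n) :
    ((PySem.List.pyRange 1 n 1).foldl
        (fun acc i => if PySem.Int.mod n i = 0 then acc ++ [i] else acc) []).sum
      = ∑ d ∈ Finset.Ico 1 n.toNat, pvGA n.toNat d := by
  obtain ⟨m, rfl⟩ : ∃ m : ℕ, n = (m : Int) := ⟨n.toNat, (Int.toNat_of_nonneg hn).symm⟩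
  rw [PySem.List.foldl_append_ite_eq_filter, List.nil_append, pv_filter_sum,
    PySem.List.pyRange_one, List.map_map, pv_list_sum_range,
    Finset.sum_Ico_eq_sum_range]
  have h1 : (((m : Int)) - 1).toNat = (m : Int).toNat - 1 := by omega
  rw [h1]
  refine Finset.sum_congr rfl (fun k _ => ?_)
  have h2 : ((1 : Int) + (k : Int)) = ((1 + k : ℕ) : Int) := by push_cast; ring
  simp only [Function.comp, h2, PySem.Int.mod_natCast, pvGA, Nat.cast_eq_zero,
    ← Nat.dvd_iff_mod_eq_zero, decide_eq_true_eq]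
  split_ifs <;> simp_all

lemma pv_loopB_aux (n : Int) (hn : 0 ≤ n) :
    ∀ (k : ℕ) (i s : Int), 1 ≤ i → Nat.sqrt n.toNat + 1 - i.toNat ≤ k →
      pvLoopB n i s = s + ∑ d ∈ Finset.Ico i.toNat (Nat.sqrt n.toNat + 1), pvGB n.toNat d := by
  intro k
  induction k with
  | zero =>
    intro i s hi hk
    have hempty : Finset.Ico i.toNat (Nat.sqrt n.toNat + 1) = ∅ :=
      Finset.Ico_eq_empty (by omega)
    have hguard : ¬ i * i ≤ n := by
      intro h
      have haa : i.toNat * i.toNat ≤ n.toNat := by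
        have : ((i.toNat : Int)) * (i.toNat : Int) ≤ ((n.toNat : Int)) := by
          rw [show ((i.toNat : Int)) = i by omega, show ((n.toNat : Int)) = n by omega]
          exact h
        exact_mod_cast this
      have := Nat.le_sqrt.mpr haa
      omega
    rw [pvLoopB, dif_neg hguard, hempty]
    simp
  | succ k ih =>
    intro i s hi hk
    by_cases hguard : i * i ≤ n
    · have haa : i.toNat * i.toNat ≤ n.toNat := by
        have : ((i.toNat : Int)) * (i.toNat : Int) ≤ ((n.toNat : Int)) := by
          rw [show ((i.toNat : Int)) = i by omega, show ((n.toNat : Int)) = n by omega]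
          exact hguard
        exact_mod_cast this
      have hd : i.toNat ≤ Nat.sqrt n.toNat := Nat.le_sqrt.mpr haa
      have hbody : (if PySem.Int.mod n i = 0 then
            let s1 := if i ≠ n then s + i else s
            let j := PySem.Int.floordiv n i
            if j ≠ i ∧ j ≠ n then s1 + j else s1
          else s) = s + pvGB n.toNat i.toNat := by
        rw [show n = ((n.toNat : Int)) by omega, show i = ((i.toNat : Int)) by omega]
        set m := n.toNat
        set a := i.toNat
        simp only [PySem.Int.mod_natCast, PySem.Int.floordiv_natCast, Nat.cast_eq_zero,
          ← Nat.dvd_iff_mod_eq_zero, ne_eq, Nat.cast_inj, Int.toNat_natCast, pvGB]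
        split_ifs <;> push_cast <;> ring
      rw [pvLoopB, dif_pos hguard]
      show pvLoopB n (i + 1) _ = _
      rw [hbody, ih (i + 1) (s + pvGB n.toNat i.toNat) (by omega) (by omega),
        show (i + 1).toNat = i.toNat + 1 by omega,
        Finset.sum_eq_sum_Ico_succ_bot (by omega : i.toNat < Nat.sqrt n.toNat + 1)]
      ring
    · have hempty : Finset.Ico i.toNat (Nat.sqrt n.toNat + 1) = ∅ := by
        refine Finset.Ico_eq_empty ?_
        intro hlt
        apply hguard
        have h1 : i.toNat ≤ Nat.sqrt n.toNat := by omega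
        have h2 : i.toNat * i.toNat ≤ n.toNat := Nat.le_sqrt.mp h1
        have : ((i.toNat : Int)) * (i.toNat : Int) ≤ ((n.toNat : Int)) := by exact_mod_cast h2
        rw [show ((i.toNat : Int)) = i by omega, show ((n.toNat : Int)) = n by omega] at this
        exact this
      rw [pvLoopB, dif_neg hguard, hempty]
      simp

lemma pv_loopB (n : Int) (hn : 0 ≤ n) (i s : Int) (hi : 1 ≤ i) :
    pvLoopB n i s = s + ∑ d ∈ Finset.Ico i.toNat (Nat.sqrt n.toNat + 1), pvGB n.toNat d :=
  pv_loopB_aux n hn (Nat.sqrt n.toNat + 1 - i.toNat) i s hi le_rfl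

-- cofactor indicator over the low range (with and without the d = 1 term)
def pvH (m d : ℕ) : Int := if d ∣ m ∧ d * d ≠ m then ((m / d : ℕ) : Int) else 0
def pvH2 (m d : ℕ) : Int := if d ∣ m ∧ d * d ≠ m ∧ d ≠ 1 then ((m / d : ℕ) : Int) else 0

lemma pv_pairing (m : ℕ) (hm : 2 ≤ m) :
    ∑ d ∈ Finset.Ico (Nat.sqrt m + 1) (m + 1), pvGA m d
      = ∑ d ∈ Finset.Ico 1 (Nat.sqrt m + 1), pvH m d := by
  set q := Nat.sqrt m with hq
  have hq2 : q * q ≤ m := by have := Nat.sqrt_le' m; rwa [pow_two] at this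
  have hmq : m < (q + 1) * (q + 1) := Nat.lt_succ_sqrt m
  have h1 : ∑ d ∈ Finset.Ico (q + 1) (m + 1), pvGA m d
      = ∑ d ∈ (Finset.Ico (q + 1) (m + 1)).filter (fun d => d ∣ m), ((d : ℕ) : Int) := by
    rw [Finset.sum_filter]; rfl
  have h2 : ∑ d ∈ Finset.Ico 1 (q + 1), pvH m d
      = ∑ d ∈ (Finset.Ico 1 (q + 1)).filter (fun d => d ∣ m ∧ d * d ≠ m), ((m / d : ℕ) : Int) := by
    rw [Finset.sum_filter]; rfl
  rw [h1, h2]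
  refine Finset.sum_nbij' (fun d => m / d) (fun d => m / d) ?_ ?_ ?_ ?_ ?_
  · intro d hd
    simp only [Finset.mem_filter, Finset.mem_Ico] at hd ⊢
    obtain ⟨⟨hdl, hdr⟩, hdvd⟩ := hd
    have hd0 : 0 < d := by omega
    have hmd : d * (m / d) = m := Nat.mul_div_cancel' hdvd
    have hpos : 0 < m / d := Nat.div_pos (by omega) hd0
    have hle : m / d < q + 1 := by
      by_contra h
      push_neg at h
      have : (q + 1) * (q + 1) ≤ d * (m / d) := Nat.mul_le_mul (by omega) h
      rw [hmd] at this
      omega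
    refine ⟨⟨by omega, hle⟩, Nat.div_dvd_of_dvd hdvd, ?_⟩
    intro heq
    have hcancel : d * (m / d) = (m / d) * (m / d) := by rw [hmd, heq]
    have : d = m / d := Nat.eq_of_mul_eq_mul_right hpos hcancel
    omega
  · intro d hd
    simp only [Finset.mem_filter, Finset.mem_Ico] at hd ⊢
    obtain ⟨⟨hdl, hdr⟩, hdvd, hdd⟩ := hd
    have hd0 : 0 < d := by omega
    have hmd : d * (m / d) = m := Nat.mul_div_cancel' hdvd
    have hpos : 0 < m / d := Nat.div_pos (Nat.le_of_dvd (by omega) hdvd) hd0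
    have hgt : q + 1 ≤ m / d := by
      by_contra h
      push_neg at h
      have e1 : d * (m / d) ≤ q * q := Nat.mul_le_mul (by omega) (by omega)
      rw [hmd] at e1
      have e2 : m = q * q := le_antisymm e1 hq2
      have e3 : d = q := by
        by_contra hne
        have hlt : d < q := lt_of_le_of_ne (by omega) hne
        have c1 : d * (m / d) ≤ d * q := Nat.mul_le_mul_left d (by omega)
        have c2 : d * q < q * q := Nat.mul_lt_mul_of_lt_of_le hlt (le_refl q) (by omega)
        have : d * (m / d) < q * q := lt_of_le_of_lt c1 c2
        rw [hmd] at this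
        omega
      apply hdd
      have e4 : m / d = q := by
        have : d * (m / d) = d * q := by rw [hmd, e2, e3]
        exact Nat.eq_of_mul_eq_mul_left hd0 this
      rw [e3, e2]
    refine ⟨⟨hgt, ?_⟩, Nat.div_dvd_of_dvd hdvd⟩
    have := Nat.div_le_self m d
    omega
  · intro d hd
    simp only [Finset.mem_filter, Finset.mem_Ico] at hd
    exact Nat.div_div_self hd.2 (by omega)
  · intro d hd
    simp only [Finset.mem_filter, Finset.mem_Ico] at hd
    exact Nat.div_div_self hd.2.1 (by omega)
  · intro d hd
    simp only [Finset.mem_filter, Finset.mem_Ico] at hd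
    rw [Nat.div_div_self hd.2 (by omega)]

lemma pv_FG (m : ℕ) :
    ∑ d ∈ Finset.Ico 1 m, pvGA m d = ∑ d ∈ Finset.Ico 1 (Nat.sqrt m + 1), pvGB m d := by
  by_cases hm : m ≤ 1
  · interval_cases m <;> decide
  · push_neg at hm
    set q := Nat.sqrt m with hq
    have hq1 : 1 ≤ q := Nat.sqrt_pos.mpr (by omega)
    have hqm : q < m := Nat.sqrt_lt_self (by omega)
    have step1 : ∑ d ∈ Finset.Ico 1 (m + 1), pvGA m d
        = ∑ d ∈ Finset.Ico 1 m, pvGA m d + (m : Int) := by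
      rw [Finset.sum_Ico_succ_top (by omega)]
      simp [pvGA]
    have step2 : ∑ d ∈ Finset.Ico 1 (q + 1), pvGA m d + ∑ d ∈ Finset.Ico (q + 1) (m + 1), pvGA m d
        = ∑ d ∈ Finset.Ico 1 (m + 1), pvGA m d :=
      Finset.sum_Ico_consecutive _ (by omega) (by omega)
    have bridge : ∀ d ∈ Finset.Ico 1 (q + 1), pvGB m d = pvGA m d + pvH2 m d := by
      intro d hd
      rw [Finset.mem_Ico] at hd
      by_cases hdvd : d ∣ m
      · have hd0 : 0 < d := hd.1
        have hdm : d ≠ m := by omega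
        have hiff1 : m / d = d ↔ m = d * d := Nat.div_eq_iff_eq_mul_left hd0 hdvd
        have hiff2 : m / d = m ↔ d = 1 := by
          rw [Nat.div_eq_self]
          omega
        have hcond : (m / d ≠ d ∧ m / d ≠ m) ↔ (d * d ≠ m ∧ d ≠ 1) := by
          rw [Ne, Ne, Ne, Ne, hiff1, hiff2, eq_comm]
        simp only [pvGA, pvGB, pvH2, hdvd, true_and, hdm, ne_eq, not_false_eq_true, if_pos]
        exact congrArg (fun z => ((d : ℕ) : Int) + z) (if_congr hcond rfl rfl)
      · simp [pvGA, pvGB, pvH2, hdvd]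
    have split_d1 : ∑ d ∈ Finset.Ico 1 (q + 1), pvH m d
        = ∑ d ∈ Finset.Ico 1 (q + 1), pvH2 m d + (m : Int) := by
      rw [Finset.sum_eq_sum_Ico_succ_bot (by omega : 1 < q + 1) (pvH m),
        Finset.sum_eq_sum_Ico_succ_bot (by omega : 1 < q + 1) (pvH2 m)]
      have hH1 : pvH m 1 = (m : Int) := by
        simp [pvH]
        omega
      have hH21 : pvH2 m 1 = 0 := by simp [pvH2]
      have hcong : ∑ d ∈ Finset.Ico 2 (q + 1), pvH m d
          = ∑ d ∈ Finset.Ico 2 (q + 1), pvH2 m d := by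
        refine Finset.sum_congr rfl (fun d hd => ?_)
        rw [Finset.mem_Ico] at hd
        have hd1 : d ≠ 1 := by omega
        simp [pvH, pvH2, hd1]
      rw [hH1, hH21, hcong]
      ring
    have hGB : ∑ d ∈ Finset.Ico 1 (q + 1), pvGB m d
        = ∑ d ∈ Finset.Ico 1 (q + 1), pvGA m d + ∑ d ∈ Finset.Ico 1 (q + 1), pvH2 m d := by
      rw [← Finset.sum_add_distrib]
      exact Finset.sum_congr rfl bridge
    have hpair := pv_pairing m (by omega)
    rw [hGB]
    have := step2
    rw [step1] at this
    rw [hpair, split_d1] at this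
    omega

-- ===== VERDICT (by name: the statement is the Claim_ definition above) =====
theorem perfectCheck_spec : Claim_equal_perfectCheck := by
  intro n _
  unfold Spec_perfectCheck perfectCheck perfectCheck_alt
  by_cases hn : 0 ≤ n
  · simp only [pv_sumA n hn, pv_loopB n hn 1 0 le_rfl, Int.toNat_one, pv_FG n.toNat]
    norm_num
  · have h1 : PySem.List.pyRange 1 n 1 = [] := PySem.List.pyRange_one_eq_nil (by omega)
    have h2 : pvLoopB n 1 0 = 0 := by
      rw [pvLoopB]; simp only [dif_neg (by omega : ¬ (1:Int) * 1 ≤ n)]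
    simp [h1, h2]
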